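-- pv_equiv track=rewrite | github.com/keiserlab/consensus-learning-paper | core.py | customUserSort
-- ===== SOURCE A (Python) =====
-- def customUserSort(l):
--     """
--     given list L, will return the same list, but sorted in the user order:
--     ['UG1', 'UG2', 'NP1', 'NP2', 'NP3', 'NP4', 'NP5']
--     And also keeping all ensembles behind non-ensembles
--     Anything in the list that doesn't have a user keyword within it, will be added to the end of the list, in the same order that it occurs in the input list L
--     """
--     use_multiple_subnets = False
--     for i in range(0, len(l)):
--         if "multiple_subnets" in l[i]:
--             use_multiple_subnets = True
--     consensus_individs = ["thresholding_{}".format(i) for i in range(1, 6)]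
--     individs = ['UG1', 'UG2', 'NP1', 'NP2', 'NP3', 'NP4', 'NP5']
--     consensus_ensembles = ["ensemble_model_all{}".format(ci) for ci in consensus_individs]
--     individ_ensembles = ["ensemble_model_{}".format(i) for i in individs]
--     USERS =   consensus_individs + individs + consensus_ensembles + individ_ensembles
--     if use_multiple_subnets:
--         consensus_mult_rand_ensembles = ["ensemble_use_multiple_subnets_model_all{}".format(ci) for ci in consensus_individs]
--         individ_mult_rand_ensembles = ["ensemble_use_multiple_subnets_model_{}".format(i) for i in individs]
--         USERS =  consensus_individs + individs + consensus_mult_rand_ensembles + individ_mult_rand_ensembles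
--     new_list = []
--     indices_extracted = []
--     for u in USERS:
--         for i in range(0, len(l)):
--             if u in l[i] and l[i] not in new_list:
--                 new_list.append(l[i])
--                 indices_extracted.append(i)
--     indices_remaining = []
--     for i in range(0, len(l)):
--         if i not in indices_extracted:
--             indices_remaining.append(i)
--     for index in indices_remaining:
--         new_list.append(l[index])
--     assert len(new_list) == len(l)
--     assert set(new_list) == set(l)
--     return new_list
-- ===== SOURCE B (Python) =====
-- def customUserSort(l):
--     """
--     given list L, will return the same list, but sorted in the user order:
--     ['UG1', 'UG2', 'NP1', 'NP2', 'NP3', 'NP4', 'NP5']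
--     And also keeping all ensembles behind non-ensembles
--     Anything in the list that doesn't have a user keyword within it, will be added to the end of the list, in the same order that it occurs in the input list L
--     """
--     use_multiple_subnets = any("multiple_subnets" in x for x in l)
--     consensus_individs = ["thresholding_{}".format(i) for i in range(1, 6)]
--     individs = ['UG1', 'UG2', 'NP1', 'NP2', 'NP3', 'NP4', 'NP5']
--     consensus_ensembles = ["ensemble_model_all{}".format(ci) for ci in consensus_individs]
--     individ_ensembles = ["ensemble_model_{}".format(i) for i in individs]
--     USERS = consensus_individs + individs + consensus_ensembles + individ_ensembles
--     if use_multiple_subnets: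
--         consensus_mult_rand_ensembles = ["ensemble_use_multiple_subnets_model_all{}".format(ci) for ci in consensus_individs]
--         individ_mult_rand_ensembles = ["ensemble_use_multiple_subnets_model_{}".format(i) for i in individs]
--         USERS = consensus_individs + individs + consensus_mult_rand_ensembles + individ_mult_rand_ensembles
--     n = len(USERS)
--     # one pass: bucket each first occurrence of a keyword-bearing value by the
--     # index of the first user keyword it contains; everything else keeps its order
--     buckets = [[] for _ in range(n)]
--     remaining = []
--     seen = set()
--     for x in l:
--         p = n
--         for k, u in enumerate(USERS):
--             if u in x:
--                 p = k
--                 break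
--         if p < n and x not in seen:
--             seen.add(x)
--             buckets[p].append(x)
--         else:
--             remaining.append(x)
--     out = []
--     for b in buckets:
--         out += b
--     return out + remaining
-- ===== Notes on version B (the rewrite author's own statement) =====
-- stated objective: alternative
-- what changed: Replaces the nested per-user scans with a linear-in-new_list dedup test by a single pass over l that computes each element's first-matching-user priority once, dedups via a set, and drops first occurrences into per-priority buckets that are concatenated at the end; index bookkeeping for the leftover tail disappears entirely.
import Mathlib
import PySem

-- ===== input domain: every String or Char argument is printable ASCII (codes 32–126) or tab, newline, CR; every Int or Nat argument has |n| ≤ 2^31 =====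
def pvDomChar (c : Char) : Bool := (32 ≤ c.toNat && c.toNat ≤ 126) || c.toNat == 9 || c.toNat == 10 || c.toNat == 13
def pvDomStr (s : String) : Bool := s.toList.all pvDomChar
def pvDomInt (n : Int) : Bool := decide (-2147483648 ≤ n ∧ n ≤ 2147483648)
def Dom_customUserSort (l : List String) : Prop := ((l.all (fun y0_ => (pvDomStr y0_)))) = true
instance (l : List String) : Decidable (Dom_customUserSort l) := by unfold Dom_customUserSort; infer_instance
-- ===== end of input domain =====

-- B replaces A's nested per-user scans (with a linear membership test into the growing
-- result) by one pass over l that computes each element's first-matching-user priority,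
-- dedups with a set and collects first occurrences into per-priority buckets.


-- ===== PORT A =====
-- USERS setup of A: the multiple_subnets detection loop and the keyword lists, verbatim.
def pvAUsers (l : List String) : List String :=
  let use_multiple_subnets :=
    (PySem.List.pyRange 0 (PySem.List.len l) 1).foldl
      (fun b i => if PySem.Str.isIn "multiple_subnets" (PySem.List.pyGetD l i "") then true else b) false
  let consensus_individs := (PySem.List.pyRange 1 6 1).map (fun i => "thresholding_" ++ PySem.Int.toStr i)
  let individs := ["UG1", "UG2", "NP1", "NP2", "NP3", "NP4", "NP5"]
  let consensus_ensembles := consensus_individs.map (fun ci => "ensemble_model_all" ++ ci)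
  let individ_ensembles := individs.map (fun i => "ensemble_model_" ++ i)
  let USERS := consensus_individs ++ individs ++ consensus_ensembles ++ individ_ensembles
  if use_multiple_subnets then
    let consensus_mult_rand_ensembles := consensus_individs.map (fun ci => "ensemble_use_multiple_subnets_model_all" ++ ci)
    let individ_mult_rand_ensembles := individs.map (fun i => "ensemble_use_multiple_subnets_model_" ++ i)
    consensus_individs ++ individs ++ consensus_mult_rand_ensembles ++ individ_mult_rand_ensembles
  else USERS

def customUserSort (l : List String) : List String :=
  let USERS := pvAUsers l
  let st := USERS.foldl
    (fun (st : List String × List Int) u =>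
      (PySem.List.pyRange 0 (PySem.List.len l) 1).foldl
        (fun st i =>
          if PySem.Str.isIn u (PySem.List.pyGetD l i "") && !(st.1.contains (PySem.List.pyGetD l i "")) then
            (st.1 ++ [PySem.List.pyGetD l i ""], st.2 ++ [i])
          else st) st)
    ([], [])
  let indices_remaining :=
    (PySem.List.pyRange 0 (PySem.List.len l) 1).foldl
      (fun acc i => if !(st.2.contains i) then acc ++ [i] else acc) []
  indices_remaining.foldl (fun nl i => nl ++ [PySem.List.pyGetD l i ""]) st.1

-- ===== PORT B =====
-- USERS setup of B: same lists, detection via any(...).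
def pvBUsers (l : List String) : List String :=
  let use_multiple_subnets := l.any (fun x => PySem.Str.isIn "multiple_subnets" x)
  let consensus_individs := (PySem.List.pyRange 1 6 1).map (fun i => "thresholding_" ++ PySem.Int.toStr i)
  let individs := ["UG1", "UG2", "NP1", "NP2", "NP3", "NP4", "NP5"]
  let consensus_ensembles := consensus_individs.map (fun ci => "ensemble_model_all" ++ ci)
  let individ_ensembles := individs.map (fun i => "ensemble_model_" ++ i)
  let USERS := consensus_individs ++ individs ++ consensus_ensembles ++ individ_ensembles
  if use_multiple_subnets then
    let consensus_mult_rand_ensembles := consensus_individs.map (fun ci => "ensemble_use_multiple_subnets_model_all" ++ ci)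
    let individ_mult_rand_ensembles := individs.map (fun i => "ensemble_use_multiple_subnets_model_" ++ i)
    consensus_individs ++ individs ++ consensus_mult_rand_ensembles ++ individ_mult_rand_ensembles
  else USERS

-- B's inner 'for k, u in enumerate(USERS): if u in x: p = k; break' (p = n when no user matches)
def pvPrio (users : List String) (x : String) : Nat :=
  match users with
  | [] => 0
  | u :: rest => if PySem.Str.isIn u x then 0 else pvPrio rest x + 1

def customUserSort_alt (l : List String) : List String :=
  let USERS := pvBUsers l
  let n := USERS.length
  let st := l.foldl
    (fun (st : List (List String) × List String × PySem.Set String) x =>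
      let p := pvPrio USERS x
      if decide (p < n) && !(PySem.Set.contains st.2.2 x) then
        (st.1.set p (st.1.getD p [] ++ [x]), st.2.1, PySem.Set.add st.2.2 x)
      else
        (st.1, st.2.1 ++ [x], st.2.2))
    (List.replicate n [], [], PySem.Set.empty)
  st.1.foldl (fun out b => out ++ b) [] ++ st.2.1

-- ===== PRECONDITION & SPEC =====
def Spec_customUserSort (l : List String) (out : List String) : Prop := out = customUserSort_alt l
instance (l : List String) (out : List String) : Decidable (Spec_customUserSort l out) := by unfold Spec_customUserSort; infer_instance

-- ===== CLAIM (what is proved, stated in full; the proofs are below) =====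
def Claim_equal_customUserSort : Prop := ∀ (l : List String), Dom_customUserSort l → Spec_customUserSort l (customUserSort l)

-- ===== LEMMAS AND PROOFS =====

-- first occurrences of rest relative to the already-seen prefix pre (spec helper)
def pvFO (pre : List String) : List String → List String
  | [] => []
  | x :: t => if x ∈ pre then pvFO pre t else x :: pvFO (pre ++ [x]) t

-- elements of rest that are NOT a first occurrence of a keyword-bearing value (spec helper)
def pvRem (users : List String) (pre : List String) : List String → List String
  | [] => []
  | x :: t =>
    if pvPrio users x < users.length ∧ x ∉ pre then pvRem users (pre ++ [x]) t
    else x :: pvRem users (pre ++ [x]) t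

-- A's inner pass, as a fold over (index, value) pairs
def pvAPass (u : String) (st : List String × List Int) (e : List (Int × String)) : List String × List Int :=
  e.foldl
    (fun st p =>
      if PySem.Str.isIn u p.2 && !(st.1.contains p.2) then (st.1 ++ [p.2], st.2 ++ [p.1]) else st) st

theorem prio_isIn (users : List String) (x : String) (m : Nat) (hm : m < users.length)
    (h : pvPrio users x = m) : PySem.Str.isIn users[m] x = true := by
  induction users generalizing m with
  | nil => simp at hm
  | cons u rest ih =>
    simp only [pvPrio] at h
    by_cases hx : PySem.Str.isIn u x = true
    · rw [if_pos hx] at h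
      subst h
      simpa only [List.getElem_cons_zero] using hx
    · rw [if_neg hx] at h
      cases m with
      | zero => omega
      | succ m' =>
        simp only [List.getElem_cons_succ]
        exact ih m' (by simp only [List.length_cons] at hm; omega) (by omega)

theorem isIn_prio_le (users : List String) (x : String) (m : Nat) (hm : m < users.length)
    (h : PySem.Str.isIn users[m] x = true) : pvPrio users x ≤ m := by
  induction users generalizing m with
  | nil => simp at hm
  | cons u rest ih =>
    simp only [pvPrio]
    by_cases hx : PySem.Str.isIn u x = true
    · rw [if_pos hx]; omega
    · rw [if_neg hx]
      cases m with
      | zero =>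
        simp only [List.getElem_cons_zero] at h
        exact absurd h hx
      | succ m' =>
        simp only [List.getElem_cons_succ] at h
        have := ih m' (by simp only [List.length_cons] at hm; omega) h
        omega

theorem mem_pvFO (x : String) : ∀ (rest pre : List String), x ∈ pvFO pre rest ↔ x ∈ rest ∧ x ∉ pre := by
  intro rest
  induction rest with
  | nil => simp [pvFO]
  | cons y t ih =>
    intro pre
    simp only [pvFO]
    by_cases hy : y ∈ pre
    · rw [if_pos hy, ih]
      constructor
      · rintro ⟨h1, h2⟩; exact ⟨List.mem_cons_of_mem _ h1, h2⟩
      · rintro ⟨h1, h2⟩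
        rcases List.mem_cons.mp h1 with rfl | h1
        · exact absurd hy h2
        · exact ⟨h1, h2⟩
    · rw [if_neg hy]
      simp only [List.mem_cons, ih, List.mem_append]
      constructor
      · rintro (rfl | ⟨h1, h2⟩)
        · exact ⟨Or.inl rfl, hy⟩
        · exact ⟨Or.inr h1, fun hp => h2 (Or.inl hp)⟩
      · rintro ⟨rfl | h1, h2⟩
        · exact Or.inl rfl
        · by_cases hxy : x = y
          · exact Or.inl hxy
          · refine Or.inr ⟨h1, ?_⟩
            rintro (h | rfl | h)
            · exact h2 h
            · exact hxy rfl
            · exact absurd h (List.not_mem_nil)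

theorem pvFO_congr : ∀ (rest pre pre' : List String), (∀ y, y ∈ pre ↔ y ∈ pre') →
    pvFO pre rest = pvFO pre' rest := by
  intro rest
  induction rest with
  | nil => intro pre pre' _; rfl
  | cons x t ih =>
    intro pre pre' h
    simp only [pvFO]
    by_cases hx : x ∈ pre
    · rw [if_pos hx, if_pos ((h x).mp hx)]
      exact ih pre pre' h
    · rw [if_neg hx, if_neg (fun hx' => hx ((h x).mpr hx'))]
      congr 1
      exact ih _ _ (fun y => by simp only [List.mem_append, List.mem_singleton, h y])

theorem pvFO_append_mem (x : String) (rest pre : List String) (hx : x ∈ pre) :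
    pvFO (pre ++ [x]) rest = pvFO pre rest := by
  apply pvFO_congr
  intro y; simp only [List.mem_append, List.mem_singleton]
  constructor
  · rintro (h | rfl) <;> [exact h; exact hx]
  · exact Or.inl

theorem innerA_eq (l : List String) (u : String) (st : List String × List Int) :
    (PySem.List.pyRange 0 (PySem.List.len l) 1).foldl
      (fun st i =>
        if PySem.Str.isIn u (PySem.List.pyGetD l i "") && !(st.1.contains (PySem.List.pyGetD l i "")) then
          (st.1 ++ [PySem.List.pyGetD l i ""], st.2 ++ [i])
        else st) st
    = pvAPass u st (PySem.List.enumerate l 0) := by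
  rw [pvAPass, PySem.List.enumerate_eq_map_pyRange l "", List.foldl_map]

theorem passChar (users l : List String) (u : String) (m : Nat)
    (hm : m < users.length) (hu : users[m] = u) :
    ∀ (rest pre prev : List String) (idxs0 : List Int),
    l = pre ++ rest →
    (∀ x : String, x ∈ prev ↔ (x ∈ l ∧ pvPrio users x < m) ∨ (x ∈ pre ∧ pvPrio users x = m)) →
    (pvAPass u (prev, idxs0) (PySem.List.enumerate rest (pre.length : Int))).1
      = prev ++ (pvFO pre rest).filter (fun x => pvPrio users x == m)
    ∧ (∀ i : Int, i ∈ (pvAPass u (prev, idxs0) (PySem.List.enumerate rest (pre.length : Int))).2 ↔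
        i ∈ idxs0 ∨ ∃ j : Nat, i = (j : Int) ∧ pre.length ≤ j ∧
          ∃ hj : j < l.length, l[j] ∉ l.take j ∧ pvPrio users l[j] = m) := by
  intro rest
  induction rest with
  | nil =>
    intro pre prev idxs0 hl hprev
    refine ⟨by simp [pvAPass, pvFO, PySem.List.enumerate], ?_⟩
    intro i
    simp only [pvAPass, PySem.List.enumerate, List.foldl_nil]
    constructor
    · exact Or.inl
    · rintro (h | ⟨j, rfl, hj1, hj2, _⟩)
      · exact h
      · rw [hl, List.append_nil] at hj2
        omega
  | cons x t ih =>
    intro pre prev idxs0 hl hprev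
    subst hl
    have hxl : x ∈ pre ++ x :: t := List.mem_append_right _ (List.mem_cons_self)
    have hlen : pre.length < (pre ++ x :: t).length := by
      rw [List.length_append, List.length_cons]
      omega
    have hgx : (pre ++ x :: t)[pre.length]'hlen = x := List.getElem_of_append rfl rfl
    have htake : (pre ++ x :: t).take pre.length = pre := List.take_left
    have hl' : pre ++ x :: t = (pre ++ [x]) ++ t := by
      rw [List.append_assoc, List.singleton_append]
    have hlen' : ((pre ++ [x]).length : Int) = (pre.length : Int) + 1 := by
      rw [List.length_append, List.length_singleton]
      push_cast
      ring
    rw [PySem.List.enumerate_cons]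
    by_cases hC : pvPrio users x = m ∧ x ∉ pre
    · obtain ⟨hCm, hCp⟩ := hC
      have hxprev : x ∉ prev := by
        rw [hprev x]
        rintro (⟨_, hlt⟩ | ⟨hp, _⟩)
        · omega
        · exact hCp hp
      have hcond : (PySem.Str.isIn u x && !(prev.contains x)) = true := by
        simp only [Bool.and_eq_true, Bool.not_eq_true']
        refine ⟨hu ▸ prio_isIn users x m hm hCm, ?_⟩
        rw [← Bool.not_eq_true]
        exact fun hc => hxprev (List.contains_iff_mem.mp hc)
      have hstep : pvAPass u (prev, idxs0) (((pre.length : Int), x) :: PySem.List.enumerate t ((pre.length : Int) + 1))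
          = pvAPass u (prev ++ [x], idxs0 ++ [(pre.length : Int)]) (PySem.List.enumerate t ((pre.length : Int) + 1)) := by
        simp only [pvAPass, List.foldl_cons, hcond, if_pos]
      rw [hstep, ← hlen']
      have hprev' : ∀ y : String, y ∈ prev ++ [x] ↔
          (y ∈ pre ++ x :: t ∧ pvPrio users y < m) ∨ (y ∈ pre ++ [x] ∧ pvPrio users y = m) := by
        intro y
        constructor
        · intro hy
          rcases List.mem_append.mp hy with hy | hy
          · rcases (hprev y).mp hy with h | ⟨h1, h2⟩
            · exact Or.inl h
            · exact Or.inr ⟨List.mem_append_left _ h1, h2⟩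
          · obtain rfl := List.mem_singleton.mp hy
            exact Or.inr ⟨List.mem_append_right _ (List.mem_singleton.mpr rfl), hCm⟩
        · rintro (h | ⟨h1, h2⟩)
          · exact List.mem_append_left _ ((hprev y).mpr (Or.inl h))
          · rcases List.mem_append.mp h1 with h1 | h1
            · exact List.mem_append_left _ ((hprev y).mpr (Or.inr ⟨h1, h2⟩))
            · exact List.mem_append_right _ h1
      obtain ⟨ih1, ih2⟩ := ih (pre ++ [x]) (prev ++ [x]) (idxs0 ++ [(pre.length : Int)]) hl' hprev'
      refine ⟨?_, ?_⟩
      · rw [ih1, show pvFO pre (x :: t) = x :: pvFO (pre ++ [x]) t from by rw [pvFO, if_neg hCp],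
          List.filter_cons_of_pos (by simpa using hCm), List.append_assoc, List.singleton_append]
      · intro i
        rw [ih2 i]
        constructor
        · rintro (hmem | ⟨j, rfl, hj1, hj2, hj3, hj4⟩)
          · rcases List.mem_append.mp hmem with hmem | hmem
            · exact Or.inl hmem
            · obtain rfl := List.mem_singleton.mp hmem
              refine Or.inr ⟨pre.length, rfl, le_refl _, hlen, ?_, ?_⟩
              · rw [hgx, htake]
                exact hCp
              · rw [hgx]
                exact hCm
          · refine Or.inr ⟨j, rfl, ?_, hj2, hj3, hj4⟩
            rw [List.length_append, List.length_singleton] at hj1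
            omega
        · rintro (hmem | ⟨j, rfl, hj1, hj2, hj3, hj4⟩)
          · exact Or.inl (List.mem_append_left _ hmem)
          · by_cases hj : j = pre.length
            · subst hj
              exact Or.inl (List.mem_append_right _ (List.mem_singleton.mpr rfl))
            · refine Or.inr ⟨j, rfl, ?_, hj2, hj3, hj4⟩
              rw [List.length_append, List.length_singleton]
              omega
    · have hcond : (PySem.Str.isIn u x && !(prev.contains x)) = false := by
        rw [Bool.and_eq_false_iff]
        by_cases hin : PySem.Str.isIn u x = true
        · refine Or.inr ?_
          rw [Bool.not_eq_false', List.contains_iff_mem]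
          have hle : pvPrio users x ≤ m := isIn_prio_le users x m hm (hu ▸ hin)
          by_cases hlt : pvPrio users x < m
          · exact (hprev x).mpr (Or.inl ⟨hxl, hlt⟩)
          · have hem : pvPrio users x = m := by omega
            have hxpre : x ∈ pre := by
              by_contra hp
              exact hC ⟨hem, hp⟩
            exact (hprev x).mpr (Or.inr ⟨hxpre, hem⟩)
        · exact Or.inl (by simpa using hin)
      have hstep : pvAPass u (prev, idxs0) (((pre.length : Int), x) :: PySem.List.enumerate t ((pre.length : Int) + 1))
          = pvAPass u (prev, idxs0) (PySem.List.enumerate t ((pre.length : Int) + 1)) := by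
        simp only [pvAPass, List.foldl_cons, hcond, Bool.false_eq_true, if_false]
      rw [hstep, ← hlen']
      have hprev' : ∀ y : String, y ∈ prev ↔
          (y ∈ pre ++ x :: t ∧ pvPrio users y < m) ∨ (y ∈ pre ++ [x] ∧ pvPrio users y = m) := by
        intro y
        rw [hprev y]
        constructor
        · rintro (h | ⟨h1, h2⟩)
          · exact Or.inl h
          · exact Or.inr ⟨List.mem_append_left _ h1, h2⟩
        · rintro (h | ⟨h1, h2⟩)
          · exact Or.inl h
          · rcases List.mem_append.mp h1 with h1 | h1
            · exact Or.inr ⟨h1, h2⟩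
            · obtain rfl := List.mem_singleton.mp h1
              have hypre : y ∈ pre := by
                by_contra hp
                exact hC ⟨h2, hp⟩
              exact Or.inr ⟨hypre, h2⟩
      obtain ⟨ih1, ih2⟩ := ih (pre ++ [x]) prev idxs0 hl' hprev'
      refine ⟨?_, ?_⟩
      · rw [ih1]
        by_cases hxpre : x ∈ pre
        · rw [pvFO_append_mem x t pre hxpre,
            show pvFO pre (x :: t) = pvFO pre t from by rw [pvFO, if_pos hxpre]]
        · have hnem : pvPrio users x ≠ m := fun hem => hC ⟨hem, hxpre⟩
          rw [show pvFO pre (x :: t) = x :: pvFO (pre ++ [x]) t from by rw [pvFO, if_neg hxpre],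
            List.filter_cons_of_neg (by simpa using hnem)]
      · intro i
        rw [ih2 i]
        constructor
        · rintro (hmem | ⟨j, rfl, hj1, hj2, hj3, hj4⟩)
          · exact Or.inl hmem
          · refine Or.inr ⟨j, rfl, ?_, hj2, hj3, hj4⟩
            rw [List.length_append, List.length_singleton] at hj1
            omega
        · rintro (hmem | ⟨j, rfl, hj1, hj2, hj3, hj4⟩)
          · exact Or.inl hmem
          · by_cases hj : j = pre.length
            · subst hj
              rw [hgx] at hj4
              rw [hgx, htake] at hj3
              exact absurd ⟨hj4, hj3⟩ hC
            · refine Or.inr ⟨j, rfl, ?_, hj2, hj3, hj4⟩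
              rw [List.length_append, List.length_singleton]
              omega

theorem mem_flatten_ext (users l : List String) (m : Nat) (x : String) :
    x ∈ ((List.range m).map (fun k => (pvFO [] l).filter (fun x => pvPrio users x == k))).flatten ↔
      (x ∈ l ∧ pvPrio users x < m) := by
  simp only [List.mem_flatten, List.mem_map, List.mem_range]
  constructor
  · rintro ⟨L, ⟨k, hk, rfl⟩, hxL⟩
    obtain ⟨hfo, hbeq⟩ := List.mem_filter.mp hxL
    obtain ⟨hxl, -⟩ := (mem_pvFO x l []).mp hfo
    have heq : pvPrio users x = k := beq_iff_eq.mp hbeq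
    exact ⟨hxl, by omega⟩
  · rintro ⟨hxl, hlt⟩
    exact ⟨_, ⟨pvPrio users x, hlt, rfl⟩,
      List.mem_filter.mpr ⟨(mem_pvFO x l []).mpr ⟨hxl, by simp⟩, by simp⟩⟩

theorem outerA (users l : List String) :
    ∀ (todo : List String) (m : Nat) (st : List String × List Int),
    users.drop m = todo → m ≤ users.length →
    st.1 = ((List.range m).map (fun k => (pvFO [] l).filter (fun x => pvPrio users x == k))).flatten →
    (∀ i : Int, i ∈ st.2 ↔ ∃ j : Nat, i = (j : Int) ∧
        ∃ hj : j < l.length, l[j] ∉ l.take j ∧ pvPrio users l[j] < m) →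
    (todo.foldl (fun st u => pvAPass u st (PySem.List.enumerate l 0)) st).1
      = ((List.range users.length).map (fun k => (pvFO [] l).filter (fun x => pvPrio users x == k))).flatten
    ∧ (∀ i : Int, i ∈ (todo.foldl (fun st u => pvAPass u st (PySem.List.enumerate l 0)) st).2 ↔
        ∃ j : Nat, i = (j : Int) ∧ ∃ hj : j < l.length, l[j] ∉ l.take j ∧
          pvPrio users l[j] < users.length) := by
  intro todo
  induction todo with
  | nil =>
    intro m st hdrop hle h1 h2
    have hm : m = users.length := by
      have := List.drop_eq_nil_iff.mp hdrop
      omega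
    subst hm
    exact ⟨h1, h2⟩
  | cons u t ih =>
    intro m st hdrop hle h1 h2
    obtain ⟨s1, s2⟩ := st
    dsimp only at h1 h2
    have hm : m < users.length := by
      by_contra h
      rw [List.drop_eq_nil_iff.mpr (by omega)] at hdrop
      exact List.cons_ne_nil u t hdrop.symm
    have hu : users[m] = u := by
      have h0 : (users.drop m)[0]? = some u := by rw [hdrop]; rfl
      rw [List.getElem?_drop] at h0
      simp only [Nat.add_zero] at h0
      rwa [List.getElem?_eq_getElem hm, Option.some_inj] at h0
    have hdrop' : users.drop (m + 1) = t := by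
      have hd : users.drop (m + 1) = (users.drop m).drop 1 := by
        rw [List.drop_drop]
      rw [hd, hdrop, List.drop_one, List.tail_cons]
    have hpc := passChar users l u m hm hu l [] s1 s2 (by simp)
      (by
        intro x
        rw [h1, mem_flatten_ext users l m x]
        simp)
    simp only [List.length_nil, Nat.cast_zero] at hpc
    obtain ⟨hpc1, hpc2⟩ := hpc
    simp only [List.foldl_cons]
    apply ih (m + 1) (pvAPass u (s1, s2) (PySem.List.enumerate l 0)) hdrop' (by omega)
    · rw [hpc1, h1, List.range_succ]
      simp
    · intro i
      rw [hpc2 i]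
      constructor
      · rintro (hmem | ⟨j, rfl, -, hj2, hj3, hj4⟩)
        · obtain ⟨j, rfl, hj2, hj3, hj4⟩ := (h2 i).mp hmem
          exact ⟨j, rfl, hj2, hj3, by omega⟩
        · exact ⟨j, rfl, hj2, hj3, by omega⟩
      · rintro ⟨j, rfl, hj2, hj3, hj4⟩
        by_cases hj : pvPrio users (l[j]'hj2) < m
        · exact Or.inl ((h2 _).mpr ⟨j, rfl, hj2, hj3, hj⟩)
        · exact Or.inr ⟨j, rfl, Nat.zero_le _, hj2, hj3, by omega⟩

theorem remChar (users l : List String) (idxs : List Int)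
    (hidx : ∀ i : Int, i ∈ idxs ↔ ∃ j : Nat, i = (j : Int) ∧
        ∃ hj : j < l.length, l[j] ∉ l.take j ∧ pvPrio users l[j] < users.length) :
    ∀ (rest pre : List String), l = pre ++ rest →
    ((PySem.List.pyRange (pre.length : Int) (l.length : Int) 1).filter
        (fun i => !(idxs.contains i))).map (fun i => PySem.List.pyGetD l i "")
      = pvRem users pre rest := by
  intro rest
  induction rest with
  | nil =>
    intro pre hl
    subst hl
    rw [PySem.List.pyRange_one_eq_nil (by simp)]
    simp [pvRem]
  | cons x t ihr =>
    intro pre hl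
    subst hl
    have hlen : pre.length < (pre ++ x :: t).length := by
      rw [List.length_append, List.length_cons]
      omega
    have hgx : (pre ++ x :: t)[pre.length]'hlen = x := List.getElem_of_append rfl rfl
    have htake : (pre ++ x :: t).take pre.length = pre := List.take_left
    have hl' : pre ++ x :: t = (pre ++ [x]) ++ t := by
      rw [List.append_assoc, List.singleton_append]
    have hlen' : ((pre ++ [x]).length : Int) = (pre.length : Int) + 1 := by
      rw [List.length_append, List.length_singleton]
      push_cast
      ring
    have hltI : (pre.length : Int) < ((pre ++ x :: t).length : Int) := by
      exact_mod_cast hlen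
    rw [PySem.List.pyRange_one_cons hltI]
    by_cases hkeep : pvPrio users x < users.length ∧ x ∉ pre
    · have hmem : ((pre.length : Nat) : Int) ∈ idxs := by
        rw [hidx]
        exact ⟨pre.length, rfl, hlen, by rw [hgx, htake]; exact hkeep.2, by rw [hgx]; exact hkeep.1⟩
      rw [List.filter_cons_of_neg (by
        rw [Bool.not_eq_true', Bool.not_eq_false]
        exact List.contains_iff_mem.mpr hmem)]
      rw [show pvRem users pre (x :: t) = pvRem users (pre ++ [x]) t from by
        rw [pvRem, if_pos hkeep]]
      rw [← ihr (pre ++ [x]) hl', hlen']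
    · have hmem : ((pre.length : Nat) : Int) ∉ idxs := by
        rw [hidx]
        rintro ⟨j, hji, hj, hj3, hj4⟩
        have : j = pre.length := by exact_mod_cast hji.symm
        subst this
        rw [hgx] at hj4
        rw [hgx, htake] at hj3
        exact hkeep ⟨hj4, hj3⟩
      rw [List.filter_cons_of_pos (by
        rw [Bool.not_eq_true']
        rw [← Bool.not_eq_true, List.contains_iff_mem]
        exact hmem)]
      rw [List.map_cons]
      rw [show PySem.List.pyGetD (pre ++ x :: t) ((pre.length : Nat) : Int) "" = x from by
        rw [PySem.List.pyGetD_natCast, List.getD_eq_getElem _ _ hlen, hgx]]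
      rw [show pvRem users pre (x :: t) = x :: pvRem users (pre ++ [x]) t from by
        rw [pvRem, if_neg hkeep]]
      rw [← ihr (pre ++ [x]) hl', hlen']

theorem map_getD_range_eq_self (b : List (List String)) (n : Nat) (h : b.length = n) :
    (List.range n).map (fun k => b.getD k []) = b := by
  apply List.ext_getElem
  · simp [h]
  · intro i h1 h2
    simp only [List.getElem_map, List.getElem_range]
    exact List.getD_eq_getElem b [] h2

theorem getD_set (b : List (List String)) (p k : Nat) (v : List String) (hk : k < b.length) :
    (b.set p v).getD k [] = if p = k then v else b.getD k [] := by
  rw [List.getD_eq_getElem _ _ (by simpa using hk), List.getD_eq_getElem _ _ hk, List.getElem_set]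

theorem foldB (users : List String) :
    ∀ (rest pre : List String) (buckets : List (List String)) (rem : List String) (seen : PySem.Set String),
    buckets.length = users.length →
    (∀ x : String, x ∈ seen ↔ x ∈ pre ∧ pvPrio users x < users.length) →
    (rest.foldl
        (fun (st : List (List String) × List String × PySem.Set String) x =>
          if decide (pvPrio users x < users.length) && !(PySem.Set.contains st.2.2 x) then
            (st.1.set (pvPrio users x) (st.1.getD (pvPrio users x) [] ++ [x]), st.2.1, PySem.Set.add st.2.2 x)
          else (st.1, st.2.1 ++ [x], st.2.2))
        (buckets, rem, seen)).1
      = (List.range users.length).map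
          (fun k => buckets.getD k [] ++ (pvFO pre rest).filter (fun x => pvPrio users x == k))
    ∧ (rest.foldl
        (fun (st : List (List String) × List String × PySem.Set String) x =>
          if decide (pvPrio users x < users.length) && !(PySem.Set.contains st.2.2 x) then
            (st.1.set (pvPrio users x) (st.1.getD (pvPrio users x) [] ++ [x]), st.2.1, PySem.Set.add st.2.2 x)
          else (st.1, st.2.1 ++ [x], st.2.2))
        (buckets, rem, seen)).2.1
      = rem ++ pvRem users pre rest := by
  intro rest
  induction rest with
  | nil =>
    intro pre buckets rem seen hb hseen
    refine ⟨?_, by simp [pvRem]⟩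
    simp only [List.foldl_nil, pvFO, List.filter_nil, List.append_nil]
    exact (map_getD_range_eq_self buckets users.length hb).symm
  | cons x t ih =>
    intro pre buckets rem seen hb hseen
    simp only [List.foldl_cons]
    by_cases h1 : pvPrio users x < users.length ∧ x ∉ seen
    · obtain ⟨hp, hs⟩ := h1
      have hxpre : x ∉ pre := fun hxp => hs ((hseen x).mpr ⟨hxp, hp⟩)
      have hcond : (decide (pvPrio users x < users.length) && !(PySem.Set.contains seen x)) = true := by
        simp only [Bool.and_eq_true, decide_eq_true_eq, Bool.not_eq_true']
        refine ⟨hp, ?_⟩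
        rw [← Bool.not_eq_true]
        exact fun hc => hs ((PySem.Set.contains_iff seen x).mp hc)
      rw [if_pos hcond]
      have hseen' : ∀ y : String, y ∈ PySem.Set.add seen x ↔ y ∈ pre ++ [x] ∧ pvPrio users y < users.length := by
        intro y
        rw [PySem.Set.mem_add]
        constructor
        · rintro (hy | rfl)
          · obtain ⟨hy1, hy2⟩ := (hseen y).mp hy
            exact ⟨List.mem_append_left _ hy1, hy2⟩
          · exact ⟨List.mem_append_right _ (List.mem_singleton.mpr rfl), hp⟩
        · rintro ⟨hy1, hy2⟩
          rcases List.mem_append.mp hy1 with hy1 | hy1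
          · exact Or.inl ((hseen y).mpr ⟨hy1, hy2⟩)
          · exact Or.inr (List.mem_singleton.mp hy1)
      have hb' : (buckets.set (pvPrio users x) (buckets.getD (pvPrio users x) [] ++ [x])).length = users.length := by
        simpa using hb
      obtain ⟨ih1, ih2⟩ := ih (pre ++ [x]) _ rem _ hb' hseen'
      have hfo : pvFO pre (x :: t) = x :: pvFO (pre ++ [x]) t := by
        rw [pvFO, if_neg hxpre]
      refine ⟨?_, ?_⟩
      · rw [ih1, hfo]
        apply List.map_congr_left
        intro k hk
        have hk' : k < users.length := List.mem_range.mp hk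
        rw [getD_set _ _ _ _ (by omega)]
        by_cases hkp : pvPrio users x = k
        · rw [if_pos hkp, List.filter_cons_of_pos (by simpa using hkp), hkp,
            List.append_assoc, List.singleton_append]
        · rw [if_neg hkp, List.filter_cons_of_neg (by simpa using hkp)]
      · rw [ih2, pvRem, if_pos ⟨hp, hxpre⟩]
    · have hcond : (decide (pvPrio users x < users.length) && !(PySem.Set.contains seen x)) = false := by
        by_cases hp' : pvPrio users x < users.length
        · have hxs : x ∈ seen := by
            by_contra hs
            exact h1 ⟨hp', hs⟩
          simp only [Bool.and_eq_false_iff, Bool.not_eq_false']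
          exact Or.inr ((PySem.Set.contains_iff seen x).mpr hxs)
        · simp [hp']
      rw [hcond]
      simp only [Bool.false_eq_true, if_false]
      have hseen' : ∀ y : String, y ∈ seen ↔ y ∈ pre ++ [x] ∧ pvPrio users y < users.length := by
        intro y
        rw [hseen y]
        constructor
        · rintro ⟨hy1, hy2⟩
          exact ⟨List.mem_append_left _ hy1, hy2⟩
        · rintro ⟨hy1, hy2⟩
          rcases List.mem_append.mp hy1 with hy1 | hy1
          · exact ⟨hy1, hy2⟩
          · obtain rfl := List.mem_singleton.mp hy1
            by_contra hs
            have hxs : y ∈ seen := by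
              by_contra hs2
              exact h1 ⟨hy2, hs2⟩
            exact hs ((hseen y).mp hxs)
        
      obtain ⟨ih1, ih2⟩ := ih (pre ++ [x]) buckets (rem ++ [x]) seen hb hseen'
      refine ⟨?_, ?_⟩
      · rw [ih1]
        by_cases hxpre : x ∈ pre
        · rw [pvFO_append_mem x t pre hxpre]
          rw [show pvFO pre (x :: t) = pvFO pre t from by rw [pvFO, if_pos hxpre]]
        · have hpn : ¬ pvPrio users x < users.length := by
            intro hp'
            have hxs : x ∈ seen := by
              by_contra hs
              exact h1 ⟨hp', hs⟩
            exact hxpre ((hseen x).mp hxs).1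
          rw [show pvFO pre (x :: t) = x :: pvFO (pre ++ [x]) t from by rw [pvFO, if_neg hxpre]]
          apply List.map_congr_left
          intro k hk
          have hk' : k < users.length := List.mem_range.mp hk
          rw [List.filter_cons_of_neg (by
            simp only [beq_iff_eq]
            omega)]
      · rw [ih2]
        have hnot : ¬ (pvPrio users x < users.length ∧ x ∉ pre) := by
          rintro ⟨hp', hxpre⟩
          have hxs : x ∈ seen := by
            by_contra hs
            exact h1 ⟨hp', hs⟩
          exact hxpre ((hseen x).mp hxs).1
        rw [pvRem, if_neg hnot, List.append_assoc, List.singleton_append]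

theorem users_eq (l : List String) : pvAUsers l = pvBUsers l := by
  unfold pvAUsers pvBUsers
  rw [PySem.List.foldl_pyRange_zero_pyGetD l "" (fun b x => if PySem.Str.isIn "multiple_subnets" x then true else b) false,
    PySem.List.foldl_if_true_eq, Bool.false_or]

theorem getD_replicate_nil (n k : Nat) : (List.replicate n ([] : List String)).getD k [] = [] := by
  rcases Nat.lt_or_ge k n with h | h
  · rw [List.getD_eq_getElem _ _ (by simpa using h), List.getElem_replicate]
  · rw [List.getD_eq_default _ _ (by simpa using h)]

theorem A_normal (l : List String) :
    customUserSort l =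
      ((List.range (pvAUsers l).length).map
          (fun k => (pvFO [] l).filter (fun x => pvPrio (pvAUsers l) x == k))).flatten
        ++ pvRem (pvAUsers l) [] l := by
  simp only [customUserSort, innerA_eq]
  have hout := outerA (pvAUsers l) l (pvAUsers l) 0 ([], []) rfl (Nat.zero_le _)
    (by simp) (by intro i; simp)
  obtain ⟨h1, h2⟩ := hout
  rw [h1, PySem.List.foldl_append_if_eq_filter
    (fun i => !((((pvAUsers l).foldl (fun st u => pvAPass u st (PySem.List.enumerate l 0)) ([], [])).2).contains i)),
    List.nil_append, PySem.List.foldl_append_singleton_eq_map]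
  congr 1
  have hrc := remChar (pvAUsers l)
    l (((pvAUsers l).foldl (fun st u => pvAPass u st (PySem.List.enumerate l 0)) ([], [])).2) h2 l [] (by simp)
  simp only [List.length_nil, Nat.cast_zero] at hrc
  rw [← hrc]
  rfl

theorem B_normal (l : List String) :
    customUserSort_alt l =
      ((List.range (pvBUsers l).length).map
          (fun x => (pvFO [] l).filter (fun x_1 => pvPrio (pvBUsers l) x_1 == x))).flatten
        ++ pvRem (pvBUsers l) [] l := by
  simp only [customUserSort_alt]
  have h := foldB (pvBUsers l) l []
    (List.replicate (pvBUsers l).length []) [] PySem.Set.empty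
    (by simp)
    (by intro x; simp [PySem.Set.empty])
  obtain ⟨h1, h2⟩ := h
  rw [h1, h2, PySem.List.foldl_append_eq_flatten, List.nil_append, List.nil_append]
  congr 2
  apply List.map_congr_left
  intro k _
  rw [getD_replicate_nil, List.nil_append]

-- ===== VERDICT (by name: the statement is the Claim_ definition above) =====
theorem customUserSort_spec : Claim_equal_customUserSort := by
  intro l _
  unfold Spec_customUserSort
  rw [A_normal, B_normal, users_eq]
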